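-- pv_equiv track=rewrite | github.com/ch10874/tasteforge-scraper | oda.py | split_outside_parentheses
-- ===== SOURCE A (Python) =====
-- def split_outside_parentheses(s, delimiter=','):
--     """Split string by delimiter, ignoring delimiters inside parentheses."""
--     parts = []
--     current = []
--     depth = 0
--     for c in s:
--         if c == '(':
--             depth += 1
--         elif c == ')':
--             if depth > 0:
--                 depth -= 1
--         if c == delimiter and depth == 0:
--             part = ''.join(current).strip()
--             if part:
--                 parts.append(part)
--             current = []
--         else:
--             current.append(c)
--     part = ''.join(current).strip()
--     if part:
--         parts.append(part)
--     return parts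
-- ===== SOURCE B (Python) =====
-- def split_outside_parentheses(s, delimiter=','):
--     """Split string by delimiter, ignoring delimiters inside parentheses."""
--     depth = 0
--     cuts = []
--     for i, c in enumerate(s):
--         if c == '(':
--             depth += 1
--         elif c == ')':
--             if depth > 0:
--                 depth -= 1
--         if c == delimiter and depth == 0:
--             cuts.append(i)
--     parts = []
--     prev = -1
--     for idx in cuts + [len(s)]:
--         part = s[prev + 1:idx].strip()
--         if part:
--             parts.append(part)
--         prev = idx
--     return parts
-- ===== Notes on version B (the rewrite author's own statement) =====
-- stated objective: alternative
-- what changed: Replaces A's running character-accumulator (building each part char by char) with a two-pass index-table-then-slice structure: first collect the depth-0 delimiter indices, then slice the string between consecutive cut points, stripping and filtering each slice.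
import Mathlib
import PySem

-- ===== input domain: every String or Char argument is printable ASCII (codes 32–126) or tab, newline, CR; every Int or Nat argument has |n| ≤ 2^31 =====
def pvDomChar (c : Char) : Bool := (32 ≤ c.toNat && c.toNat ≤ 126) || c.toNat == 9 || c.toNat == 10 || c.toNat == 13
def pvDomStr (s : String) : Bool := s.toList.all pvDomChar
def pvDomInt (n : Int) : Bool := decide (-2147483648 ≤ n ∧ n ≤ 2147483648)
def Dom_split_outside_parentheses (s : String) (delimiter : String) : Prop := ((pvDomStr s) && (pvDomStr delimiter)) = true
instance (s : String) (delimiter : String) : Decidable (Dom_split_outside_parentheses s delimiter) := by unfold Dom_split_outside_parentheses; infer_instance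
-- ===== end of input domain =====

-- B replaces A's running character-accumulator by a first pass collecting the depth-0
-- delimiter indices and a second pass slicing the string between them (alternative decomposition).

-- ===== PORT A =====
-- state: (parts, current, depth); one step of A's for-loop body
def pvAStep (delimiter : String) (st : List String × List Char × Nat) (c : Char) :
    List String × List Char × Nat :=
  let depth :=
    if c = '(' then st.2.2 + 1
    else if c = ')' then (if 0 < st.2.2 then st.2.2 - 1 else st.2.2)
    else st.2.2
  if delimiter.toList = [c] ∧ depth = 0 then
    let part := PySem.Chars.strip st.2.1
    ((if part ≠ [] then st.1 ++ [String.ofList part] else st.1), [], depth)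
  else
    (st.1, st.2.1 ++ [c], depth)

def split_outside_parentheses (s : String) (delimiter : String) : List String :=
  let st := s.toList.foldl (pvAStep delimiter) ([], [], 0)
  let part := PySem.Chars.strip st.2.1
  if part ≠ [] then st.1 ++ [String.ofList part] else st.1

-- ===== PORT B =====
-- first pass: state (depth, cuts); collect indices of depth-0 delimiter characters
def pvCutStep (delimiter : String) (st : Nat × List Int) (ic : Int × Char) : Nat × List Int :=
  let depth :=
    if ic.2 = '(' then st.1 + 1
    else if ic.2 = ')' then (if 0 < st.1 then st.1 - 1 else st.1)
    else st.1
  if delimiter.toList = [ic.2] ∧ depth = 0 then (depth, st.2 ++ [ic.1]) else (depth, st.2)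

-- second pass: state (parts, prev); slice s[prev+1:idx], strip, keep if non-empty
def pvSliceStep (cs : List Char) (st : List String × Int) (idx : Int) : List String × Int :=
  let part := PySem.Chars.strip (PySem.List.slice cs (some (st.2 + 1)) (some idx))
  ((if part ≠ [] then st.1 ++ [String.ofList part] else st.1), idx)

def split_outside_parentheses_alt (s : String) (delimiter : String) : List String :=
  let cs := s.toList
  let cuts := (PySem.List.enumerate cs 0).foldl (pvCutStep delimiter) (0, [])
  ((cuts.2 ++ [(cs.length : Int)]).foldl (pvSliceStep cs) ([], -1)).1

-- ===== PRECONDITION & SPEC =====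
def Spec_split_outside_parentheses (s : String) (delimiter : String) (out : List String) : Prop := out = split_outside_parentheses_alt s delimiter
instance (s : String) (delimiter : String) (out : List String) : Decidable (Spec_split_outside_parentheses s delimiter out) := by unfold Spec_split_outside_parentheses; infer_instance

-- ===== CLAIM (what is proved, stated in full; the proofs are below) =====
def Claim_equal_split_outside_parentheses : Prop := ∀ (s : String) (delimiter : String), Dom_split_outside_parentheses s delimiter → Spec_split_outside_parentheses s delimiter (split_outside_parentheses s delimiter)

-- ===== LEMMAS AND PROOFS =====

-- Main invariant: after A has consumed `done` with state (P, cur, d) where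
-- cur is the slice of cs after the last cut (starting at index m), and B's
-- second-pass fold over the cuts K so far yields (P, m-1), the two finished
-- results over the remaining suffix `t` agree.
theorem pvMain (delimiter : String) (cs : List Char) :
    ∀ (t done : List Char), cs = done ++ t →
    ∀ (P : List String) (d : Nat) (K : List Int) (m : Nat), m ≤ done.length →
    (K.foldl (pvSliceStep cs) ([], -1)) = (P, (m : Int) - 1) →
    (let st := t.foldl (pvAStep delimiter)
        (P, (cs.drop m).take (done.length - m), d)
     let part := PySem.Chars.strip st.2.1
     if part ≠ [] then st.1 ++ [String.ofList part] else st.1)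
    =
    ((((PySem.List.enumerate t (done.length : Int)).foldl (pvCutStep delimiter) (d, K)).2
        ++ [(cs.length : Int)]).foldl (pvSliceStep cs) ([], -1)).1 := by
  intro t
  induction t with
  | nil =>
    intro done hcs P d K m hm hB
    simp only [List.foldl_nil, PySem.List.enumerate_nil]
    rw [List.foldl_append, hB, List.foldl_cons, List.foldl_nil]
    have hdone : cs = done := by simpa using hcs
    subst hdone
    simp only [pvSliceStep]
    have h1 : (m : Int) - 1 + 1 = ((m : Nat) : Int) := by ring
    rw [h1, PySem.List.slice_natCast]
  | cons c t' ih =>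
    intro done hcs P d K m hm hB
    rw [PySem.List.enumerate_cons]
    simp only [List.foldl_cons]
    -- the updated depth, identical in both steps
    set d' := (if c = '(' then d + 1 else if c = ')' then (if 0 < d then d - 1 else d) else d) with hd'
    have hcur : PySem.List.slice cs (some ((m : Int) - 1 + 1)) (some (done.length : Int))
        = (cs.drop m).take (done.length - m) := by
      have h1 : (m : Int) - 1 + 1 = ((m : Nat) : Int) := by ring
      rw [h1, PySem.List.slice_natCast]
    by_cases hcase : delimiter.toList = [c] ∧ d' = 0
    · -- delimiter hit at depth 0: a cut at index done.length
      have hA : pvAStep delimiter (P, (cs.drop m).take (done.length - m), d) c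
          = ((if PySem.Chars.strip ((cs.drop m).take (done.length - m)) ≠ [] then
                P ++ [String.ofList (PySem.Chars.strip ((cs.drop m).take (done.length - m)))]
              else P), [], d') := by
        simp only [pvAStep, ← hd', if_pos hcase]
      have hC : pvCutStep delimiter (d, K) ((done.length : Int), c)
          = (d', K ++ [(done.length : Int)]) := by
        simp only [pvCutStep, ← hd', if_pos hcase]
      rw [hA, hC]
      have hB' : ((K ++ [(done.length : Int)]).foldl (pvSliceStep cs) ([], -1))
          = ((if PySem.Chars.strip ((cs.drop m).take (done.length - m)) ≠ [] then
                P ++ [String.ofList (PySem.Chars.strip ((cs.drop m).take (done.length - m)))]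
              else P), ((done.length + 1 : Nat) : Int) - 1) := by
        rw [List.foldl_append, hB, List.foldl_cons, List.foldl_nil]
        simp only [pvSliceStep, hcur]
        rw [Prod.mk.injEq]; exact ⟨rfl, by push_cast; ring⟩
      have := ih (done ++ [c]) (by simpa using hcs)
        (if PySem.Chars.strip ((cs.drop m).take (done.length - m)) ≠ [] then
            P ++ [String.ofList (PySem.Chars.strip ((cs.drop m).take (done.length - m)))]
          else P)
        d' (K ++ [(done.length : Int)]) (done.length + 1) (by simp) hB'
      simp only [List.length_append, List.length_cons, List.length_nil] at this ⊢
      have hz : done.length + (0 + 1) - (done.length + 1) = 0 := by omega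
      have hE : ((done.length : Int) + 1) = (((done.length + 1 : Nat)) : Int) := by push_cast; ring
      rw [hE]
      simpa [hz, List.take_zero] using this
    · -- no cut: the character joins the current segment
      have hA : pvAStep delimiter (P, (cs.drop m).take (done.length - m), d) c
          = (P, (cs.drop m).take (done.length - m) ++ [c], d') := by
        simp only [pvAStep, ← hd', if_neg hcase]
      have hC : pvCutStep delimiter (d, K) ((done.length : Int), c) = (d', K) := by
        simp only [pvCutStep, ← hd', if_neg hcase]
      rw [hA, hC]
      have hget : cs[done.length]? = some c := by
        subst hcs
        rw [List.getElem?_append_right (le_refl _)]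
        simp
      have hcur' : (cs.drop m).take (done.length + 1 - m)
          = (cs.drop m).take (done.length - m) ++ [c] := by
        have h1 : done.length + 1 - m = (done.length - m) + 1 := by omega
        rw [h1, List.take_add_one]
        have h2 : (cs.drop m)[done.length - m]? = cs[done.length]? := by
          rw [List.getElem?_drop]; congr 1; omega
        rw [h2, hget]; rfl
      have := ih (done ++ [c]) (by simpa using hcs) P d' K m (by simp; omega) hB
      simp only [List.length_append, List.length_cons, List.length_nil] at this ⊢
      have hE : ((done.length : Int) + 1) = (((done.length + 1 : Nat)) : Int) := by push_cast; ring
      rw [hE]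
      have h01 : done.length + (0 + 1) = done.length + 1 := by omega
      rw [h01] at this ⊢
      rw [hcur'] at this
      exact this

-- ===== VERDICT (by name: the statement is the Claim_ definition above) =====
theorem split_outside_parentheses_spec : Claim_equal_split_outside_parentheses := by
  intro s delimiter _
  show split_outside_parentheses s delimiter = split_outside_parentheses_alt s delimiter
  unfold split_outside_parentheses split_outside_parentheses_alt
  have := pvMain delimiter s.toList s.toList [] rfl [] 0 [] 0 (by simp) (by simp)
  simpa using this
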